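-- pv_equiv track=rewrite | github.com/Stars1233/SpatialVID | utils/get_instruction_enhanced.py | remove_conflicting_instructions
-- ===== SOURCE A (Python) =====
-- def remove_conflicting_instructions(instructions, conflict_groups):
--     """Remove conflicting instructions (keep higher-voted ones)."""
--     selected = []
--     selected_set = set()
--     for inst, count in instructions:
--         conflict = False
--         for group in conflict_groups:
--             if inst in group and any(s in group for s in selected_set):
--                 conflict = True
--                 break
--         if not conflict:
--             selected.append((inst, count))
--             selected_set.add(inst)
--     return selected
-- ===== SOURCE B (Python) =====
-- def remove_conflicting_instructions(instructions, conflict_groups):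
--     """Remove conflicting instructions (keep higher-voted ones)."""
--     # Precompute, for every instruction string, the list of conflict-group indices it belongs to.
--     pairs = [(inst, i) for i, group in enumerate(conflict_groups) for inst in group]
--     groups_of = {}
--     for inst, i in pairs:
--         groups_of.setdefault(inst, []).append(i)
--     blocked = set()
--     selected = []
--     for inst, count in instructions:
--         idxs = groups_of.get(inst, [])
--         if not any(i in blocked for i in idxs):
--             selected.append((inst, count))
--             blocked.update(idxs)
--     return selected
-- ===== Notes on version B (the rewrite author's own statement) =====
-- stated objective: faster
-- what changed: B precomputes an instruction-to-group-indices map once and keeps a set of blocked group indices, so each instruction is checked against its own group indices instead of rescanning every conflict group against the whole selected set.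
import Mathlib
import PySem

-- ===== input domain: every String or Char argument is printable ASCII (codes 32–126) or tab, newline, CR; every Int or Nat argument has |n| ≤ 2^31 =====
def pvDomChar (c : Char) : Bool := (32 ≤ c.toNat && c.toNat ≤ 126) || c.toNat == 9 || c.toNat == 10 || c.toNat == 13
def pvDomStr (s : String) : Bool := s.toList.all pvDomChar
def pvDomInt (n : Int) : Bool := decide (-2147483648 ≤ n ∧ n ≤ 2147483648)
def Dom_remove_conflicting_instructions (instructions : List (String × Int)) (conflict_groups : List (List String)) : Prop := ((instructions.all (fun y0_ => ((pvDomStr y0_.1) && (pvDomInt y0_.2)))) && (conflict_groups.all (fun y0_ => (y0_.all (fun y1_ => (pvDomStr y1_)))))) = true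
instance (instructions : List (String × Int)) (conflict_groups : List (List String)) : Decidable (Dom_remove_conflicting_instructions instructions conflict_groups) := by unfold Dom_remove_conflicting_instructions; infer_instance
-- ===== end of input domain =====

-- B precomputes an instruction→group-indices map and a blocked-index set, replacing A's rescans of all groups against the selected set; return values proved equal.


-- ===== PORT A =====
-- one iteration of A's main loop: scan every conflict group; conflict if some group
-- contains the instruction and some already-selected instruction
def rci_stepA (conflict_groups : List (List String))
    (st : List (String × Int) × PySem.Set String) (p : String × Int) :
    List (String × Int) × PySem.Set String :=
  let conflict := conflict_groups.any (fun group =>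
    group.contains p.1 && st.2.any (fun s => group.contains s))
  if conflict then st else (st.1 ++ [p], PySem.Set.add st.2 p.1)

def remove_conflicting_instructions (instructions : List (String × Int)) (conflict_groups : List (List String)) : List (String × Int) :=
  (instructions.foldl (rci_stepA conflict_groups) ([], PySem.Set.empty)).1

-- ===== PORT B =====
-- pairs = [(inst, i) for i, group in enumerate(conflict_groups) for inst in group]
def rci_pairs (conflict_groups : List (List String)) : List (String × Int) :=
  (PySem.List.enumerate conflict_groups 0).flatMap (fun ig => ig.2.map (fun inst => (inst, ig.1)))

-- groups_of: for inst, i in pairs: groups_of.setdefault(inst, []).append(i)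
def rci_groups_of (conflict_groups : List (List String)) : PySem.Dict String (List Int) :=
  (rci_pairs conflict_groups).foldl (fun d q => d.modify q.1 [] (· ++ [q.2])) PySem.Dict.empty

-- one iteration of B's main loop: look up the instruction's group indices; keep it
-- unless one of them is already blocked, then block all of them
def rci_stepB (groups_of : PySem.Dict String (List Int))
    (st : List (String × Int) × PySem.Set Int) (p : String × Int) :
    List (String × Int) × PySem.Set Int :=
  let idxs := groups_of.getD p.1 []
  if idxs.any (fun i => PySem.Set.contains st.2 i) then st
  else (st.1 ++ [p], PySem.Set.update st.2 idxs)

def remove_conflicting_instructions_alt (instructions : List (String × Int)) (conflict_groups : List (List String)) : List (String × Int) :=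
  let groups_of := rci_groups_of conflict_groups
  (instructions.foldl (rci_stepB groups_of) ([], PySem.Set.empty)).1

-- ===== PRECONDITION & SPEC =====
def Spec_remove_conflicting_instructions (instructions : List (String × Int)) (conflict_groups : List (List String)) (out : List (String × Int)) : Prop := out = remove_conflicting_instructions_alt instructions conflict_groups
instance (instructions : List (String × Int)) (conflict_groups : List (List String)) (out : List (String × Int)) : Decidable (Spec_remove_conflicting_instructions instructions conflict_groups out) := by unfold Spec_remove_conflicting_instructions; infer_instance

-- ===== CLAIM (what is proved, stated in full; the proofs are below) =====
def Claim_equal_remove_conflicting_instructions : Prop := ∀ (instructions : List (String × Int)) (conflict_groups : List (List String)), Dom_remove_conflicting_instructions instructions conflict_groups → Spec_remove_conflicting_instructions instructions conflict_groups (remove_conflicting_instructions instructions conflict_groups)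

-- ===== LEMMAS AND PROOFS =====

-- what the precomputed map stores: exactly the indices of the groups containing inst
lemma rci_getD_groups_of (conflict_groups : List (List String)) (inst : String) :
    (rci_groups_of conflict_groups).getD inst []
      = ((rci_pairs conflict_groups).filter (fun q => q.1 == inst)).map (·.2) := by
  simp [rci_groups_of, PySem.Dict.getD_foldl_modify_append]

lemma rci_mem_idxs (conflict_groups : List (List String)) (inst : String) (i : Int) :
    i ∈ ((rci_pairs conflict_groups).filter (fun q => q.1 == inst)).map (·.2)
      ↔ ∃ k : Nat, ∃ _ : k < conflict_groups.length, inst ∈ conflict_groups[k] ∧ i = (k : Int) := by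
  simp only [rci_pairs, List.mem_map, List.mem_filter, List.mem_flatMap,
    PySem.List.mem_enumerate_iff, beq_iff_eq]
  constructor
  · rintro ⟨q, ⟨⟨⟨j, g⟩, ⟨k, hk, hkj⟩, hq⟩, hq1⟩, rfl⟩
    obtain ⟨rfl, rfl⟩ : j = 0 + (k : Int) ∧ g = conflict_groups[k] :=
      ⟨congrArg Prod.fst hkj, congrArg Prod.snd hkj⟩
    obtain ⟨s, hs, rfl⟩ := hq
    subst hq1
    exact ⟨k, hk, hs, by simp⟩
  · rintro ⟨k, hk, hmem, rfl⟩
    exact ⟨(inst, (k : Int)), ⟨⟨((k : Int), conflict_groups[k]), ⟨k, hk, by simp⟩,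
      ⟨inst, hmem, rfl⟩⟩, rfl⟩, rfl⟩

-- the loop invariant: the two loops keep the same selected list, and blocked is
-- exactly the set of indices of groups containing some selected instruction
lemma rci_loop_eq (conflict_groups : List (List String)) (insts : List (String × Int))
    (sel : List (String × Int)) (selSet : PySem.Set String) (blocked : PySem.Set Int)
    (hinv : ∀ i : Int, i ∈ blocked ↔
      ∃ s ∈ selSet, ∃ k : Nat, ∃ _ : k < conflict_groups.length,
        s ∈ conflict_groups[k] ∧ i = (k : Int)) :
    (insts.foldl (rci_stepA conflict_groups) (sel, selSet)).1
      = (insts.foldl (rci_stepB (rci_groups_of conflict_groups)) (sel, blocked)).1 := by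
  induction insts generalizing sel selSet blocked with
  | nil => rfl
  | cons p rest ih =>
    simp only [List.foldl_cons]
    have hidx := rci_getD_groups_of conflict_groups p.1
    have hcond :
        (conflict_groups.any (fun group =>
            group.contains p.1 && selSet.any (fun s => group.contains s)))
          = (((rci_groups_of conflict_groups).getD p.1 []).any
              (fun i => PySem.Set.contains blocked i)) := by
      rw [Bool.eq_iff_iff]
      simp only [List.any_eq_true, Bool.and_eq_true, List.contains_iff_mem, hidx, PySem.Set.contains_iff]
      constructor
      · rintro ⟨g, hg, hpg, s, hs, hsg⟩
        obtain ⟨k, hk, rfl⟩ := List.mem_iff_getElem.mp hg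
        refine ⟨(k : Int), (rci_mem_idxs ..).mpr ⟨k, hk, hpg, rfl⟩, ?_⟩
        exact (hinv _).mpr ⟨s, hs, k, hk, hsg, rfl⟩
      · rintro ⟨i, hi, hib⟩
        obtain ⟨k, hk, hpk, rfl⟩ := (rci_mem_idxs ..).mp hi
        obtain ⟨s, hs, k', hk', hsk', hkk'⟩ := (hinv _).mp hib
        have : k = k' := by exact_mod_cast hkk'
        subst this
        exact ⟨conflict_groups[k], List.getElem_mem hk, hpk, s, hs, hsk'⟩
    simp only [rci_stepA, rci_stepB, hcond]
    by_cases hc : (((rci_groups_of conflict_groups).getD p.1 []).any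
        (fun i => PySem.Set.contains blocked i)) = true
    · simp only [hc, if_true]
      exact ih sel selSet blocked hinv
    · simp only [Bool.not_eq_true] at hc
      simp only [hc, Bool.false_eq_true, if_false]
      refine ih _ _ _ (fun i => ?_)
      rw [PySem.Set.mem_update, rci_getD_groups_of, hinv i]
      constructor
      · rintro (⟨s, hs, k, hk, hsk, rfl⟩ | hi)
        · exact ⟨s, (PySem.Set.mem_add ..).mpr (Or.inl hs), k, hk, hsk, rfl⟩
        · obtain ⟨k, hk, hpk, rfl⟩ := (rci_mem_idxs ..).mp hi
          exact ⟨p.1, (PySem.Set.mem_add ..).mpr (Or.inr rfl), k, hk, hpk, rfl⟩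
      · rintro ⟨s, hs, k, hk, hsk, rfl⟩
        rcases (PySem.Set.mem_add ..).mp hs with hs | rfl
        · exact Or.inl ⟨s, hs, k, hk, hsk, rfl⟩
        · exact Or.inr ((rci_mem_idxs ..).mpr ⟨k, hk, hsk, rfl⟩)

-- ===== VERDICT (by name: the statement is the Claim_ definition above) =====
theorem remove_conflicting_instructions_spec : Claim_equal_remove_conflicting_instructions := by
  intro instructions conflict_groups _
  unfold Spec_remove_conflicting_instructions
  unfold remove_conflicting_instructions remove_conflicting_instructions_alt
  exact rci_loop_eq conflict_groups instructions [] PySem.Set.empty PySem.Set.empty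
    (by simp [PySem.Set.empty])
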